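/- GENERATED by c/gen_decode.py: decode facts of the image, one per distinct instruction byte string. -/
import UserX.DecodeImage

#decode_all Vorbis.Dec
  "0183fc060000"  -- add DWORD PTR [rbx+0x6fc],eax
  "0f57cf"  -- xorps xmm1,xmm7
  "0f84b3fdffff"  -- je 113b22
  "0f85cd000000"  -- jne 11301d
  "0f8e1c010000"  -- jle 10df30
  "0fb64310"  -- movzx eax,BYTE PTR [rbx+0x10]
  "29c5"  -- sub ebp,eax
  "400fb6dd"  -- movzx ebx,bpl
  "410fb77c6f02"  -- movzx edi,WORD PTR [r15+rbp*2+0x2]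
  "4183c601"  -- add r14d,0x1
  "4189d1"  -- mov r9d,edx
  "41b900000000"  -- mov r9d,0x0
  "420fb6442301"  -- movzx eax,BYTE PTR [rbx+r12*1+0x1]
  "4429e2"  -- sub edx,r12d
  "448923"  -- mov DWORD PTR [rbx],r12d
  "4489b0e4060000"  -- mov DWORD PTR [rax+0x6e4],r14d
  "448b6c2450"  -- mov r13d,DWORD PTR [rsp+0x50]
  "450f47e5"  -- cmova r12d,r13d
  "45897500"  -- mov DWORD PTR [r13+0x0],r14d
  "460fb72c63"  -- movzx r13d,WORD PTR [rbx+r12*2]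
  "4829f8"  -- sub rax,rdi
  "4869db48080000"  -- imul rbx,rbx,0x848
  "4883ec08"  -- sub rsp,0x8
  "48897c2440"  -- mov QWORD PTR [rsp+0x40],rdi
  "488b4528"  -- mov rax,QWORD PTR [rbp+0x28]
  "488b9d38ffffff"  -- mov rbx,QWORD PTR [rbp-0xc8]
  "488d5c2d00"  -- lea rbx,[rbp+rbp*1+0x0]
  "488d7d1a"  -- lea rdi,[rbp+0x1a]
  "488dbb74050000"  -- lea rdi,[rbx+0x574]
  "488dbda0000000"  -- lea rdi,[rbp+0xa0]
  "48c7442420b38ab541"  -- mov QWORD PTR [rsp+0x20],0x41b58ab3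
  "4903ae38080000"  -- add rbp,QWORD PTR [r14+0x838]
  "49896e20"  -- mov QWORD PTR [r14+0x20],rbp
  "498d7c2401"  -- lea rdi,[r12+0x1]
  "498dbcc468030000"  -- lea rdi,[r12+rax*8+0x368]
  "4a8d2cbd00000000"  -- lea rbp,[r15*4+0x0]
  "4c036d18"  -- add r13,QWORD PTR [rbp+0x18]
  "4c897518"  -- mov QWORD PTR [rbp+0x18],r14
  "4c8b6dc0"  -- mov r13,QWORD PTR [rbp-0x40]
  "4c8d6d6c"  -- lea r13,[rbp+0x6c]
  "4d89cf"  -- mov r15,r9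
  "4e8db4ac20010000"  -- lea r14,[rsp+r13*4+0x120]
  "662b5c2418"  -- sub bx,WORD PTR [rsp+0x18]
  "66453b27"  -- cmp r12w,WORD PTR [r15]
  "7407"  -- je 1004bb
  "748e"  -- je 10e612
  "75f3"  -- jne 110a64
  "7d44"  -- jge 10ee82
  "7f36"  -- jg 104154
  "81ffffff0700"  -- cmp edi,0x7ffff
  "83f808"  -- cmp eax,0x8
  "89542430"  -- mov DWORD PTR [rsp+0x30],edx
  "89c8"  -- mov eax,ecx
  "8b4c2418"  -- mov ecx,DWORD PTR [rsp+0x18]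
  "8b8528ffffff"  -- mov eax,DWORD PTR [rbp-0xd8]
  "8d8101fcffff"  -- lea eax,[rcx-0x3ff]
  "bfff030000"  -- mov edi,0x3ff
  "c7452000000000"  -- mov DWORD PTR [rbp+0x20],0x0
  "c78548ffffffffffffff"  -- mov DWORD PTR [rbp-0xb8],0xffffffff
  "e807c0ffff"  -- call 100560
  "e8112effff"  -- call 100640
  "e81ab3ffff"  -- call 100640
  "e824c0feff"  -- call 1008e0
  "e82d7fffff"  -- call 10d1c0
  "e83785ffff"  -- call 104d40
  "e84311ffff"  -- call 1008e0
  "e84d7effff"  -- call 10d1c0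
  "e857c8feff"  -- call 100300
  "e86628ffff"  -- call 100640
  "e870a0feff"  -- call 100800
  "e87afeffff"  -- call 112da0
  "e887affeff"  -- call 1003c0
  "e890d5feff"  -- call 100720
  "e89ac1ffff"  -- call 100300
  "e8a5c4ffff"  -- call 100800
  "e8afe7feff"  -- call 100300
  "e8b973ffff"  -- call 100720
  "e8c3f6feff"  -- call 100480
  "e8ccf8feff"  -- call 103d00
  "e8d81cffff"  -- call 104c60
  "e8e1a9feff"  -- call 100800
  "e8eb77ffff"  -- call 100300
  "e8f2feffff"  -- call 10cf40
  "e8fe2affff"  -- call 100300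
  "e93dfdffff"  -- jmp 113b22
  "e985fdffff"  -- jmp 113b22
  "e9ded9ffff"  -- jmp 113b22
  "eb4d"  -- jmp 1022a4
  "ebcc"  -- jmp 108fe1
  "f20f2ad3"  -- cvtsi2sd xmm2,ebx
  "f20f5c0dacdc0100"  -- subsd xmm1,QWORD PTR [rip+0x1dcac]
  "f30f1045b8"  -- movss xmm0,DWORD PTR [rbp-0x48]
  "f30f106c240c"  -- movss xmm5,DWORD PTR [rsp+0xc]
  "f30f114be8"  -- movss DWORD PTR [rbx-0x18],xmm1
  "f30f116c240c"  -- movss DWORD PTR [rsp+0xc],xmm5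
  "f30f585510"  -- addss xmm2,DWORD PTR [rbp+0x10]
  "f30f59c4"  -- mulss xmm0,xmm4
  "f30f5cf0"  -- subss xmm6,xmm0
  "f3410f115d04"  -- movss DWORD PTR [r13+0x4],xmm3
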